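-- pv_equiv track=rewrite | github.com/AllenWLynch/hyperwhip | hyperherd/slurm.py | _indices_to_array_spec
-- ===== SOURCE A (Python) =====
-- from typing import Dict, List, Optional, Tuple
--
-- def _indices_to_array_spec(indices: List[int]) -> str:
--     """Convert a list of indices to a compact SLURM array spec.
--
--     Examples:
--         [0, 1, 2, 3] -> "0-3"
--         [0, 1, 3, 5, 6, 7] -> "0-1,3,5-7"
--     """
--     if not indices:
--         raise ValueError("No indices to submit")
--
--     indices = sorted(set(indices))
--     ranges = []
--     start = indices[0]
--     end = indices[0]
--
--     for i in indices[1:]: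
--         if i == end + 1:
--             end = i
--         else:
--             ranges.append((start, end))
--             start = i
--             end = i
--     ranges.append((start, end))
--
--     parts = []
--     for s, e in ranges:
--         if s == e:
--             parts.append(str(s))
--         else:
--             parts.append(f"{s}-{e}")
--
--     return ",".join(parts)
-- ===== SOURCE B (Python) =====
-- from typing import List
--
--
-- def _indices_to_array_spec(indices: List[int]) -> str:
--     """Convert a list of indices to a compact SLURM array spec.
--
--     Boundary-detection algorithm: a value v starts a run iff v-1 is not in
--     the set, and ends a run iff v+1 is not in the set; the k-th smallest
--     start pairs with the k-th smallest end (runs are disjoint and ordered),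
--     so no sequential scan over the sorted values is needed.
--     """
--     if not indices:
--         raise ValueError("No indices to submit")
--
--     s = set(indices)
--     starts = sorted(v for v in s if v - 1 not in s)
--     ends = sorted(v for v in s if v + 1 not in s)
--     return ",".join(
--         str(a) if a == b else f"{a}-{b}" for a, b in zip(starts, ends)
--     )
-- ===== Notes on version B (the rewrite author's own statement) =====
-- stated objective: alternative
-- what changed: Replaced A's sequential start/end run-tracking scan over the sorted values with membership-based boundary detection: v is a run start iff v-1 is not in the set and a run end iff v+1 is not in the set, so the runs are obtained by two independent set-membership filters plus zip of the sorted boundary lists, with no scan state at all.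
import Mathlib
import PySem

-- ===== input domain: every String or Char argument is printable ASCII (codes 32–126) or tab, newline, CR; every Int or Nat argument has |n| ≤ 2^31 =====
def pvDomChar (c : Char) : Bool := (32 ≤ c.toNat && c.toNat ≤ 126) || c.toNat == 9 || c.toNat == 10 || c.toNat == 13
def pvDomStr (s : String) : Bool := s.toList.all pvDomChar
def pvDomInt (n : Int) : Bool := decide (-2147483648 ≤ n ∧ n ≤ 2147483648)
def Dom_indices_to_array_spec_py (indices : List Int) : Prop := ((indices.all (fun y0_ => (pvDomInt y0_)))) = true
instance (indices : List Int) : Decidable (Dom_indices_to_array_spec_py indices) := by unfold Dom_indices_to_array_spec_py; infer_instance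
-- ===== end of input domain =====

-- B replaces A's sequential start/end run-tracking scan with boundary detection by set
-- membership (v starts a run iff v-1 ∉ set, ends one iff v+1 ∉ set; zip the sorted
-- boundary lists).  Objective: alternative algorithm, same cost.

-- ===== PORT A =====
def indices_to_array_spec_py (indices : List Int) : String :=
  if indices = [] then ""  -- Python A raises ValueError here; excluded by Pre_
  else
    match PySem.List.sorted (PySem.Set.ofList indices) (fun x => x) false with
    | [] => ""  -- unreachable: sorted(set(..)) of a nonempty list is nonempty
    | x :: rest =>
      let st := rest.foldl (fun (st : List (Int × Int) × Int × Int) i =>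
        if i = st.2.2 + 1 then (st.1, st.2.1, i)
        else (st.1 ++ [(st.2.1, st.2.2)], i, i)) ([], x, x)
      let ranges := st.1 ++ [(st.2.1, st.2.2)]
      let parts := ranges.map (fun p =>
        if p.1 = p.2 then PySem.Int.toStr p.1
        else PySem.Int.toStr p.1 ++ "-" ++ PySem.Int.toStr p.2)
      PySem.Str.join "," parts

-- ===== PORT B =====
-- Source B's two set-membership filters; the generator-over-set + sorted() is ported as
-- sorted of List.filter over the set's element list (iteration order is canonicalised
-- by the sort, so it does not matter).
def indices_to_array_spec_py_alt (indices : List Int) : String :=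
  if indices = [] then ""  -- Python B raises ValueError here; excluded by Pre_
  else
    PySem.Str.join ","
      (((PySem.List.sorted (List.filter
            (fun v => !decide ((v - 1) ∈ PySem.Set.ofList indices))
            (PySem.Set.ofList indices)) (fun x => x) false).zip
        (PySem.List.sorted (List.filter
            (fun v => !decide ((v + 1) ∈ PySem.Set.ofList indices))
            (PySem.Set.ofList indices)) (fun x => x) false)).map
        (fun p => if p.1 = p.2 then PySem.Int.toStr p.1
                  else PySem.Int.toStr p.1 ++ "-" ++ PySem.Int.toStr p.2))

-- ===== PRECONDITION & SPEC =====
-- Pre_ excludes only the empty list, on which both Pythons raise ValueError.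
def Pre_indices_to_array_spec_py (indices : List Int) : Prop := indices ≠ []
instance (indices : List Int) : Decidable (Pre_indices_to_array_spec_py indices) := by
  unfold Pre_indices_to_array_spec_py; infer_instance
def pvWitness_indices_to_array_spec_py : List Int := [0, 1, 3, 5, 6, 7]

def Spec_indices_to_array_spec_py (indices : List Int) (out : String) : Prop := out = indices_to_array_spec_py_alt indices
instance (indices : List Int) (out : String) : Decidable (Spec_indices_to_array_spec_py indices out) := by unfold Spec_indices_to_array_spec_py; infer_instance

-- ===== CLAIM (what is proved, stated in full; the proofs are below) =====
def Claim_equal_indices_to_array_spec_py : Prop := ∀ (indices : List Int), Dom_indices_to_array_spec_py indices → Pre_indices_to_array_spec_py indices → Spec_indices_to_array_spec_py indices (indices_to_array_spec_py indices)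

-- ===== LEMMAS AND PROOFS =====

-- A's run decomposition as a recursive spec
def pvRuns : Int → Int → List Int → List (Int × Int)
  | s, e, [] => [(s, e)]
  | s, e, i :: t => if i = e + 1 then pvRuns s i t else (s, e) :: pvRuns i i t

-- A's foldl state machine computes pvRuns
theorem pvFoldA (t : List Int) : ∀ (acc : List (Int × Int)) (s e : Int),
    (let st := t.foldl (fun (st : List (Int × Int) × Int × Int) i =>
        if i = st.2.2 + 1 then (st.1, st.2.1, i)
        else (st.1 ++ [(st.2.1, st.2.2)], i, i)) (acc, s, e)
     st.1 ++ [(st.2.1, st.2.2)]) = acc ++ pvRuns s e t := by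
  induction t with
  | nil => intro acc s e; simp [pvRuns]
  | cons i t ih =>
      intro acc s e
      simp only [List.foldl_cons, pvRuns]
      by_cases h : i = e + 1
      · simp only [if_pos h]; exact ih acc s i
      · simp only [if_neg h]
        rw [ih (acc ++ [(s, e)]) i i]
        simp

-- pvRuns s e t is pvRuns e e t with the first start replaced by s
theorem pvRuns_heads (t : List Int) : ∀ (e : Int), ∃ b r,
    pvRuns e e t = (e, b) :: r ∧ ∀ s, pvRuns s e t = (s, b) :: r := by
  induction t with
  | nil => intro e; exact ⟨e, [], rfl, fun _ => rfl⟩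
  | cons i t ih =>
      intro e
      by_cases h : i = e + 1
      · subst h
        obtain ⟨b, r, _, h2⟩ := ih (e + 1)
        exact ⟨b, r, by simp [pvRuns, h2], fun s => by simp [pvRuns, h2]⟩
      · exact ⟨e, pvRuns i i t, by simp [pvRuns, h], fun s => by simp [pvRuns, h]⟩

-- core: on a strictly increasing list, zipping the v-1-absent filter with the
-- v+1-absent filter yields exactly A's run decomposition
theorem pvCore (t : List Int) : ∀ (x : Int), (x :: t).Pairwise (· < ·) →
    ((x :: t).filter (fun v => !decide ((v - 1) ∈ (x :: t)))).zip
      ((x :: t).filter (fun v => !decide ((v + 1) ∈ (x :: t)))) = pvRuns x x t := by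
  induction t with
  | nil =>
      intro x _
      simp [pvRuns, List.filter]
  | cons i t ih =>
      intro x hp
      have hxi : x < i := (List.pairwise_cons.mp hp).1 i (by simp)
      have hxt : ∀ v ∈ t, x < v := fun v hv => (List.pairwise_cons.mp hp).1 v (by simp [hv])
      have hp' : (i :: t).Pairwise (· < ·) := (List.pairwise_cons.mp hp).2
      have hit : ∀ v ∈ t, i < v := fun v hv => (List.pairwise_cons.mp hp').1 v hv
      -- x - 1 is below every element, so x is always a run start
      have hmxS : (x - 1) ∉ (x :: i :: t) := by
        intro hm
        rcases List.mem_cons.mp hm with h1 | hm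
        · omega
        rcases List.mem_cons.mp hm with h1 | hm
        · omega
        exact absurd (hxt _ hm) (by omega)
      -- on the tail t, predecessor-membership ignores the head x
      have hcongS : ∀ v ∈ t,
          (!decide ((v - 1) ∈ (x :: i :: t))) = (!decide ((v - 1) ∈ (i :: t))) := by
        intro v hv
        have h1 := hit v hv
        refine congrArg (fun b => !b) (decide_eq_decide.mpr ?_)
        constructor
        · intro hm
          rcases List.mem_cons.mp hm with h2 | hm
          · exact absurd h2 (by omega)
          · exact hm
        · intro hm; exact List.mem_cons_of_mem x hm
      -- on the whole of i :: t, successor-membership ignores the head x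
      have hcongE : ∀ v ∈ (i :: t),
          (!decide ((v + 1) ∈ (x :: i :: t))) = (!decide ((v + 1) ∈ (i :: t))) := by
        intro v hv
        have h1 : i ≤ v := by
          rcases List.mem_cons.mp hv with h1 | hv
          · omega
          · exact le_of_lt (hit v hv)
        refine congrArg (fun b => !b) (decide_eq_decide.mpr ?_)
        constructor
        · intro hm
          rcases List.mem_cons.mp hm with h2 | hm
          · exact absurd h2 (by omega)
          · exact hm
        · intro hm; exact List.mem_cons_of_mem x hm
      by_cases h : i = x + 1
      · -- consecutive: x extends the run starting at x + 1
        subst h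
        have hS : (x :: (x + 1) :: t).filter (fun v => !decide ((v - 1) ∈ (x :: (x + 1) :: t)))
            = x :: t.filter (fun v => !decide ((v - 1) ∈ ((x + 1) :: t))) := by
          rw [List.filter_cons_of_pos (by simpa using hmxS),
              List.filter_cons_of_neg (by simp)]
          exact congrArg (List.cons x) (List.filter_congr hcongS)
        have hSy : ((x + 1) :: t).filter (fun v => !decide ((v - 1) ∈ ((x + 1) :: t)))
            = (x + 1) :: t.filter (fun v => !decide ((v - 1) ∈ ((x + 1) :: t))) := by
          rw [List.filter_cons_of_pos]
          have hx : (x + 1 : Int) - 1 ∉ ((x + 1) :: t) := by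
            intro hm
            rcases List.mem_cons.mp hm with h1 | hm
            · omega
            · exact absurd (hit _ hm) (by omega)
          simpa using hx
        have hE : (x :: (x + 1) :: t).filter (fun v => !decide ((v + 1) ∈ (x :: (x + 1) :: t)))
            = ((x + 1) :: t).filter (fun v => !decide ((v + 1) ∈ ((x + 1) :: t))) := by
          rw [List.filter_cons_of_neg (by simp)]
          exact List.filter_congr hcongE
        obtain ⟨b, r, _, h2⟩ := pvRuns_heads t (x + 1)
        have hih := ih (x + 1) hp'
        rw [h2 (x + 1)] at hih
        rcases hEy : ((x + 1) :: t).filter (fun v => !decide ((v + 1) ∈ ((x + 1) :: t))) with _ | ⟨b', E''⟩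
        · rw [hSy, hEy] at hih; simp [List.zip] at hih
        · rw [hSy, hEy] at hih
          simp only [List.zip_cons_cons, List.cons.injEq, Prod.mk.injEq] at hih
          obtain ⟨⟨_, hb⟩, hr⟩ := hih
          subst hb
          have hrun : pvRuns x x ((x + 1) :: t) = (x, b') :: r := by
            show (if x + 1 = x + 1 then pvRuns x (x + 1) t else _) = _
            rw [if_pos rfl]
            exact h2 x
          rw [hS, hE, hEy, hrun, List.zip_cons_cons, hr]
      · -- gap: x is a singleton run in front
        have hS : (x :: i :: t).filter (fun v => !decide ((v - 1) ∈ (x :: i :: t)))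
            = x :: (i :: t).filter (fun v => !decide ((v - 1) ∈ (i :: t))) := by
          rw [List.filter_cons_of_pos (by simpa using hmxS)]
          refine congrArg (List.cons x) (List.filter_congr ?_)
          intro v hv
          rcases List.mem_cons.mp hv with h1 | hv
          · subst h1
            refine congrArg (fun b => !b) (decide_eq_decide.mpr ?_)
            constructor
            · intro hm
              rcases List.mem_cons.mp hm with h2 | hm
              · exact absurd h2 (by omega)
              · exact hm
            · intro hm; exact List.mem_cons_of_mem x hm
          · exact hcongS v hv
        have hE : (x :: i :: t).filter (fun v => !decide ((v + 1) ∈ (x :: i :: t)))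
            = x :: (i :: t).filter (fun v => !decide ((v + 1) ∈ (i :: t))) := by
          rw [List.filter_cons_of_pos]
          · exact congrArg (List.cons x) (List.filter_congr hcongE)
          · have hx : (x : Int) + 1 ∉ (x :: i :: t) := by
              intro hm
              rcases List.mem_cons.mp hm with h1 | hm
              · omega
              rcases List.mem_cons.mp hm with h1 | hm
              · omega
              exact absurd (hit _ hm) (by omega)
            simpa using hx
        have hrun : pvRuns x x (i :: t) = (x, x) :: pvRuns i i t := by
          show (if i = x + 1 then _ else (x, x) :: pvRuns i i t) = _
          rw [if_neg h]
        rw [hS, hE, hrun, List.zip_cons_cons, ih i hp']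

-- sorting the filtered set equals filtering the sorted set
theorem pvFilt (ind : List Int) (p : Int → Bool) :
    PySem.List.sorted (List.filter p (PySem.Set.ofList ind)) (fun x => x) false
      = (PySem.List.sorted (PySem.Set.ofList ind) (fun x => x) false).filter p := by
  apply PySem.List.sorted_eq_of_perm_of_pairwise_lt
  · exact (PySem.List.sorted_perm (PySem.Set.ofList ind) (fun x => x) false).filter p
  · exact (PySem.List.sorted_ofList_pairwise_lt ind).filter p

-- ===== VERDICT (by name: the statement is the Claim_ definition above) =====
theorem indices_to_array_spec_py_spec : Claim_equal_indices_to_array_spec_py := by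
  intro indices _ hpre
  unfold Spec_indices_to_array_spec_py indices_to_array_spec_py indices_to_array_spec_py_alt
  rw [if_neg hpre, if_neg hpre]
  have hperm := PySem.List.sorted_perm (PySem.Set.ofList indices) (fun x => x) false
  have hpw := PySem.List.sorted_ofList_pairwise_lt (xs := indices)
  rcases hs : PySem.List.sorted (PySem.Set.ofList indices) (fun x => x) false with _ | ⟨x, t⟩
  · exfalso
    have h0 : PySem.Set.ofList indices = [] := (PySem.List.sorted_eq_nil_iff _ _ _).mp hs
    rcases hi : indices with _ | ⟨i, t⟩
    · exact hpre hi
    · have hm : i ∈ PySem.Set.ofList indices := (PySem.Set.mem_ofList _ _).mpr (by simp [hi])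
      rw [h0] at hm
      exact absurd hm (by simp)
  · rw [hs] at hperm hpw
    simp only
    rw [pvFoldA t [] x x]
    rw [pvFilt, pvFilt, hs]
    have hcongr : ∀ (d : Int), (x :: t).filter (fun v => !decide ((v + d) ∈ PySem.Set.ofList indices))
        = (x :: t).filter (fun v => !decide ((v + d) ∈ (x :: t))) := by
      intro d
      refine List.filter_congr (fun v _ => ?_)
      simp [hperm.mem_iff]
    have hm1 : (fun v => !decide ((v - 1) ∈ PySem.Set.ofList indices)) = (fun v => !decide ((v + (-1)) ∈ PySem.Set.ofList indices)) := by
      funext v; congr 1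
    have hm1' : (fun v : Int => !decide ((v + (-1)) ∈ (x :: t))) = (fun v => !decide ((v - 1) ∈ (x :: t))) := by
      funext v; congr 1
    rw [hm1, hcongr (-1), hcongr 1, hm1']
    rw [pvCore t x hpw]
    simp
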